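-- pv_equiv track=rewrite | github.com/Progambler227788/CP-CompetativeProgramming | Div 2 Compe 20 sep/ha4.py | giveSmallerValue
-- ===== SOURCE A (Python) =====
-- def giveSmallerValue(energy,maping):
--     result = -1
--     thatValue = float('inf')
--     # sorted(maping.items(),key =lambda x : x[1])
--     for key,value in enumerate(maping):  # Sort keys to check in order
--       if value < energy and value < thatValue:
--          result = key
--          thatValue= value
--     return result
-- ===== SOURCE B (Python) =====
-- def giveSmallerValue(energy, maping):
--     qualifying = [v for v in maping if v < energy]
--     if not qualifying:
--         return -1
--     return maping.index(min(qualifying))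
-- ===== Notes on version B (the rewrite author's own statement) =====
-- stated objective: simpler
-- what changed: Drops A's fused index-and-value min-tracking loop entirely: B never tracks indices during the scan; it filters the qualifying values, takes their plain min, and recovers the answer afterwards with list.index (first occurrence, which matches A's strict-< tie-breaking since any earlier equal element also qualifies).
import Mathlib
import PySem

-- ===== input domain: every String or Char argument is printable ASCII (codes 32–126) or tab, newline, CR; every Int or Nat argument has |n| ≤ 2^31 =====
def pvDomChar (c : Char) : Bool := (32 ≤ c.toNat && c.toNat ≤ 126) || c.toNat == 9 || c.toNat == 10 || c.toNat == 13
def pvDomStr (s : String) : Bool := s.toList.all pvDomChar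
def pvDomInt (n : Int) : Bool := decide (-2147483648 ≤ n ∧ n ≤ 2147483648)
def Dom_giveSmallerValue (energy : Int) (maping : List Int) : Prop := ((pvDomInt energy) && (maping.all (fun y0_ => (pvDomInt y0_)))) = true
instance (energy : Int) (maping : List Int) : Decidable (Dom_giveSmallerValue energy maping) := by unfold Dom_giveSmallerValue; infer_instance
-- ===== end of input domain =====

-- B replaces A's fused index-and-value min-tracking loop by two stages: min of the qualifying values, then list.index to recover the first index (simpler; same cost).

-- ===== PORT A =====
-- 'value < thatValue' where thatValue starts as float('inf'): none plays inf, always greater.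
def pvLtInf (v : Int) : Option Int → Bool
  | none => true
  | some tv => v < tv

def giveSmallerValue (energy : Int) (maping : List Int) : Int :=
  (List.foldl
    (fun (st : Int × Option Int) (kv : Int × Int) =>
      if kv.2 < energy && pvLtInf kv.2 st.2 then (kv.1, some kv.2) else st)
    (-1, none) (PySem.List.enumerate maping)).1

-- ===== PORT B =====
def giveSmallerValue_alt (energy : Int) (maping : List Int) : Int :=
  let qualifying := maping.filter (fun v => v < energy)
  match PySem.List.min? qualifying (fun v => v) with
  | none => -1
  | some m =>
    -- maping.index(m); m ∈ qualifying ⊆ maping, so the none branch is unreachable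
    match PySem.List.index? maping m with
    | some i => (i : Int)
    | none => -1

-- ===== PRECONDITION & SPEC =====
def Spec_giveSmallerValue (energy : Int) (maping : List Int) (out : Int) : Prop := out = giveSmallerValue_alt energy maping
instance (energy : Int) (maping : List Int) (out : Int) : Decidable (Spec_giveSmallerValue energy maping out) := by unfold Spec_giveSmallerValue; infer_instance

-- ===== CLAIM (what is proved, stated in full; the proofs are below) =====
def Claim_equal_giveSmallerValue : Prop := ∀ (energy : Int) (maping : List Int), Dom_giveSmallerValue energy maping → Spec_giveSmallerValue energy maping (giveSmallerValue energy maping)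

-- ===== LEMMAS AND PROOFS =====

-- first index of m in l as B computes it
def pvIdx (l : List Int) (m : Int) : Int :=
  match PySem.List.index? l m with
  | some i => (i : Int)
  | none => -1

theorem pv_min?_append_single (q : List Int) (x : Int) :
    PySem.List.min? (q ++ [x]) (fun v => v) =
      some (match PySem.List.min? q (fun v => v) with
            | none => x
            | some m => min m x) := by
  cases q with
  | nil =>
    rw [show PySem.List.min? ([] : List Int) (fun v => v) = none from
      (PySem.List.min?_eq_none_iff _ _).mpr rfl]
    simp [PySem.List.min?_id_cons]
  | cons y t =>
    rw [List.cons_append, PySem.List.min?_id_cons, PySem.List.min?_id_cons]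
    simp [List.foldl_append]

theorem pv_idx_append_self (l : List Int) (x : Int) (hx : x ∉ l) :
    pvIdx (l ++ [x]) x = (l.length : Int) := by
  rw [pvIdx, PySem.List.index?_append_singleton_self l x hx]

theorem pv_idx_append_mem (l : List Int) (x m : Int) (hm : m ∈ l) :
    pvIdx (l ++ [x]) m = pvIdx l m := by
  rw [pvIdx, pvIdx, PySem.List.index?_append_of_mem _ hm]

-- A's loop state after scanning l equals: no qualifying value seen → (-1, none);
-- otherwise (first index of the minimal qualifying value, that value).
theorem pv_inv (energy : Int) (l : List Int) :
    List.foldl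
      (fun (st : Int × Option Int) (kv : Int × Int) =>
        if kv.2 < energy && pvLtInf kv.2 st.2 then (kv.1, some kv.2) else st)
      (-1, none) (PySem.List.enumerate l) =
    (match PySem.List.min? (l.filter (fun v => v < energy)) (fun v => v) with
     | none => ((-1 : Int), (none : Option Int))
     | some m => (pvIdx l m, some m)) := by
  induction l using List.reverseRecOn with
  | nil => rfl
  | append_singleton l x ih =>
    rw [PySem.List.enumerate_append, List.foldl_append, ih, List.filter_append]
    by_cases hx : x < energy
    · rw [show List.filter (fun v => decide (v < energy)) [x] = [x] from by simp [hx],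
          pv_min?_append_single]
      cases hq : PySem.List.min? (l.filter (fun v => v < energy)) (fun v => v) with
      | none =>
        have hnil : l.filter (fun v => v < energy) = [] :=
          (PySem.List.min?_eq_none_iff _ _).mp hq
        have hnotin : x ∉ l := by
          intro hmem
          have hf : x ∈ l.filter (fun v => v < energy) := by
            simp [List.mem_filter, hmem, hx]
          rw [hnil] at hf
          exact absurd hf (List.not_mem_nil)
        simp [PySem.List.enumerate_cons, PySem.List.enumerate_nil, pvLtInf, hx,
          pv_idx_append_self l x hnotin]
      | some m =>
        have hmmem : m ∈ l := (List.mem_filter.mp (PySem.List.min?_mem hq)).1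
        have hmin : ∀ y ∈ l.filter (fun v => v < energy), m ≤ y :=
          fun y hy => PySem.List.min?_isMin hq y hy
        by_cases hlt : x < m
        · have hnotin : x ∉ l := by
            intro hmem
            have : m ≤ x := hmin x (by simp [List.mem_filter, hmem, hx])
            omega
          have hmx : min m x = x := by omega
          simp [PySem.List.enumerate_cons, PySem.List.enumerate_nil, pvLtInf, hx, hlt,
            hmx, pv_idx_append_self l x hnotin]
        · have hmx : min m x = m := by omega
          simp [PySem.List.enumerate_cons, PySem.List.enumerate_nil, pvLtInf, hx, hlt,
            hmx, pv_idx_append_mem l x m hmmem]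
    · rw [show List.filter (fun v => decide (v < energy)) [x] = [] from by simp [hx],
          List.append_nil]
      cases hq : PySem.List.min? (l.filter (fun v => v < energy)) (fun v => v) with
      | none =>
        simp [PySem.List.enumerate_cons, PySem.List.enumerate_nil, pvLtInf, hx]
      | some m =>
        have hmmem : m ∈ l := (List.mem_filter.mp (PySem.List.min?_mem hq)).1
        simp [PySem.List.enumerate_cons, PySem.List.enumerate_nil, pvLtInf, hx,
          pv_idx_append_mem l x m hmmem]

-- ===== VERDICT (by name: the statement is the Claim_ definition above) =====
theorem giveSmallerValue_spec : Claim_equal_giveSmallerValue := by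
  intro energy maping _
  show giveSmallerValue energy maping = giveSmallerValue_alt energy maping
  rw [giveSmallerValue, pv_inv, giveSmallerValue_alt]
  cases PySem.List.min? (maping.filter (fun v => v < energy)) (fun v => v) with
  | none => rfl
  | some m => simp [pvIdx]
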